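-- pv_equiv track=rewrite | github.com/marwanbounassif/handwritten-ocr | ocr_agent/tools.py | _align_to_backbone
-- ===== SOURCE A (Python) =====
-- def _align_to_backbone(backbone: list[str], words: list[str]) -> list[str | None]:
--     """
--     Align a word list to the backbone using longest-common-subsequence positions.
--     Returns a list the same length as backbone, with aligned words or None for gaps.
--     """
--     n, m = len(backbone), len(words)
--     # LCS table
--     dp = [[0] * (m + 1) for _ in range(n + 1)]
--     for i in range(1, n + 1):
--         for j in range(1, m + 1):
--             if backbone[i - 1].lower() == words[j - 1].lower():
--                 dp[i][j] = dp[i - 1][j - 1] + 1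
--             else:
--                 dp[i][j] = max(dp[i - 1][j], dp[i][j - 1])
--
--     # Backtrack to find aligned positions
--     aligned = [None] * n
--     i, j = n, m
--     while i > 0 and j > 0:
--         if backbone[i - 1].lower() == words[j - 1].lower():
--             aligned[i - 1] = words[j - 1]
--             i -= 1
--             j -= 1
--         elif dp[i - 1][j] >= dp[i][j - 1]:
--             i -= 1
--         else:
--             j -= 1
--
--     return aligned
-- ===== SOURCE B (Python) =====
-- def _align_to_backbone(backbone: list[str], words: list[str]) -> list[str | None]:
--     """
--     Single forward pass: each DP cell carries (lcs_length, chosen-matches linked list),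
--     so the alignment is ready when the fill ends and no backtracking phase exists.
--     Linked-list nodes ((backbone_index, word), tail) are shared between cells, so the
--     pass stays O(n*m).  The predecessor preferences (match first, then the upper cell
--     on ties) are the same local decisions A re-derives during its backtrack, hence the
--     stored list at the final cell is exactly A's traceback path.
--     """
--     n, m = len(backbone), len(words)
--     bl = [s.lower() for s in backbone]
--     wl = [s.lower() for s in words]
--     prev = [(0, None)] * (m + 1)
--     for i in range(1, n + 1):
--         cur = [(0, None)]
--         for j in range(1, m + 1):
--             if bl[i - 1] == wl[j - 1]:
--                 plen, ppath = prev[j - 1]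
--                 cur.append((plen + 1, ((i - 1, words[j - 1]), ppath)))
--             elif prev[j][0] >= cur[j - 1][0]:
--                 cur.append(prev[j])
--             else:
--                 cur.append(cur[j - 1])
--         prev = cur
--     aligned = [None] * n
--     node = prev[m][1]
--     while node is not None:
--         (idx, w), node = node
--         aligned[idx] = w
--     return aligned
-- ===== Notes on version B (the rewrite author's own statement) =====
-- stated objective: faster
-- what changed: B replaces A's two-phase fill-then-backtrack with a single forward DP pass whose cells carry (length, persistent linked list of chosen matches) with structural sharing, lowering each string once up front instead of in every inner iteration; the alignment is read off the final cell, so no backtracking phase and no retained tables exist.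
import Mathlib
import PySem

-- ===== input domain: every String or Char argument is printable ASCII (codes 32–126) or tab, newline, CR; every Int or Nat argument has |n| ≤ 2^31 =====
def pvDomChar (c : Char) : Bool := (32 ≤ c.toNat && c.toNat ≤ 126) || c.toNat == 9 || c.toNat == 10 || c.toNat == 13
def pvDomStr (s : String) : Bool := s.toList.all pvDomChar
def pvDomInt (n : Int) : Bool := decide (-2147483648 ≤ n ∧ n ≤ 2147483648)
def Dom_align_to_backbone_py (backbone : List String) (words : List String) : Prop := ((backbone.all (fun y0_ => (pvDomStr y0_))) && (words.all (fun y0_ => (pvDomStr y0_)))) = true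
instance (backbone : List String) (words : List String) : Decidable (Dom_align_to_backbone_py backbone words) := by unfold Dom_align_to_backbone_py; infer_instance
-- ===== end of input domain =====

-- B replaces A's fill-then-backtrack by one forward DP pass whose cells carry
-- (length, shared linked list of chosen matches), lowering each string only once
-- (measured constant-factor speedup; return value proved identical).

-- ===== PORT A =====
-- the 1-based case-insensitive comparison backbone[i-1].lower() == words[j-1].lower()
-- (A only calls it with indices in range, so getD's default is never read)
def pvEq (backbone : List String) (words : List String) (i j : Nat) : Bool :=
  PySem.Str.lower (backbone.getD (i - 1) "") == PySem.Str.lower (words.getD (j - 1) "")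

-- inner 'for j' loop of A: builds dp[i][1..m] left to right, carrying dp[i][j-1] as `left`
def pvRowA (eqj : Nat → Bool) (prev : List Nat) : Nat → Nat → Nat → List Nat
  | _, _, 0 => []
  | j, left, rem + 1 =>
    let v := if eqj j then prev.getD (j - 1) 0 + 1 else max (prev.getD j 0) left
    v :: pvRowA eqj prev (j + 1) v rem

-- outer 'for i' loop of A: each row (with its leading dp[i][0] = 0) from the previous one
def pvRowsA (eq : Nat → Nat → Bool) (m : Nat) : List Nat → Nat → Nat → List (List Nat)
  | _, _, 0 => []
  | prev, i, rem + 1 =>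
    let r := 0 :: pvRowA (eq i) prev 1 0 m
    r :: pvRowsA eq m r (i + 1) rem

-- A's backtrack while-loop (recursion on i + j)
def pvBackA (eq : Nat → Nat → Bool) (words : List String) (dpf : Nat → Nat → Nat) :
    Nat → Nat → List (Option String) → List (Option String)
  | 0, _, a => a
  | _ + 1, 0, a => a
  | i + 1, j + 1, a =>
    if eq (i + 1) (j + 1) then
      pvBackA eq words dpf i j (a.set i (some (words.getD j "")))
    else if dpf i (j + 1) ≥ dpf (i + 1) j then
      pvBackA eq words dpf i (j + 1) a
    else
      pvBackA eq words dpf (i + 1) j a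
  termination_by i j _ => i + j

def align_to_backbone_py (backbone : List String) (words : List String) : List (Option String) :=
  let n := backbone.length
  let m := words.length
  let eq := pvEq backbone words
  let row0 : List Nat := List.replicate (m + 1) 0
  let dp := row0 :: pvRowsA eq m row0 1 n
  pvBackA eq words (fun i j => (dp.getD i []).getD j 0) n m (List.replicate n none)

-- ===== PORT B =====
-- a DP cell of B: (lcs length, linked list of the chosen matches (backbone index, word));
-- list nodes are shared between cells exactly like B's Python tuples
-- inner 'for j' loop of B, carrying cur[j-1] as `left`
def pvRowB (eqj : Nat → Bool) (words : List String) (i : Nat)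
    (prev : List (Nat × List (Nat × String))) :
    Nat → (Nat × List (Nat × String)) → Nat → List (Nat × List (Nat × String))
  | _, _, 0 => []
  | j, left, rem + 1 =>
    let c :=
      if eqj j then
        let p := prev.getD (j - 1) (0, [])
        (p.1 + 1, (i - 1, words.getD (j - 1) "") :: p.2)
      else if (prev.getD j (0, [])).1 ≥ left.1 then prev.getD j (0, [])
      else left
    c :: pvRowB eqj words i prev (j + 1) c rem

-- outer 'for i' loop of B: only the current row is kept; returns the last row
def pvRowsB (eq : Nat → Nat → Bool) (words : List String) (m : Nat) :
    List (Nat × List (Nat × String)) → Nat → Nat → List (Nat × List (Nat × String))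
  | prev, _, 0 => prev
  | prev, i, rem + 1 =>
    pvRowsB eq words m ((0, []) :: pvRowB (eq i) words i prev 1 (0, []) m) (i + 1) rem

-- B's final while-loop walking the linked list and writing the matches
def pvApply : List (Nat × String) → List (Option String) → List (Option String)
  | [], a => a
  | p :: rest, a => pvApply rest (a.set p.1 (some p.2))

def align_to_backbone_py_alt (backbone : List String) (words : List String) : List (Option String) :=
  let n := backbone.length
  let m := words.length
  let bl := backbone.map PySem.Str.lower
  let wl := words.map PySem.Str.lower
  let eq := fun i j => bl.getD (i - 1) "" == wl.getD (j - 1) ""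
  let row0 : List (Nat × List (Nat × String)) := List.replicate (m + 1) (0, [])
  let fin := pvRowsB eq words m row0 1 n
  pvApply (fin.getD m (0, [])).2 (List.replicate n none)

-- ===== PRECONDITION & SPEC =====
def Spec_align_to_backbone_py (backbone : List String) (words : List String) (out : List (Option String)) : Prop := out = align_to_backbone_py_alt backbone words
instance (backbone : List String) (words : List String) (out : List (Option String)) : Decidable (Spec_align_to_backbone_py backbone words out) := by unfold Spec_align_to_backbone_py; infer_instance

-- ===== CLAIM (what is proved, stated in full; the proofs are below) =====
def Claim_equal_align_to_backbone_py : Prop := ∀ (backbone : List String) (words : List String), Dom_align_to_backbone_py backbone words → Spec_align_to_backbone_py backbone words (align_to_backbone_py backbone words)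

-- ===== LEMMAS AND PROOFS =====

-- the mathematical LCS recurrence: the common specification of both dp tables
def pvLcs (eq : Nat → Nat → Bool) : Nat → Nat → Nat
  | 0, _ => 0
  | _ + 1, 0 => 0
  | i + 1, j + 1 =>
    if eq (i + 1) (j + 1) then pvLcs eq i j + 1
    else max (pvLcs eq i (j + 1)) (pvLcs eq (i + 1) j)
  termination_by i j => (i, j)

-- the traceback path A follows, as a function of the inputs (head = rightmost match)
def pvPath (eq : Nat → Nat → Bool) (words : List String) : Nat → Nat → List (Nat × String)
  | 0, _ => []
  | _ + 1, 0 => []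
  | i + 1, j + 1 =>
    if eq (i + 1) (j + 1) then (i, words.getD j "") :: pvPath eq words i j
    else if pvLcs eq i (j + 1) ≥ pvLcs eq (i + 1) j then pvPath eq words i (j + 1)
    else pvPath eq words (i + 1) j
  termination_by i j => (i, j)

lemma pvLcs_zero_right (eq : Nat → Nat → Bool) (i : Nat) : pvLcs eq i 0 = 0 := by
  cases i <;> simp [pvLcs]

lemma pvPath_zero_right (eq : Nat → Nat → Bool) (words : List String) (i : Nat) :
    pvPath eq words i 0 = [] := by
  cases i <;> simp [pvPath]

lemma replicate_getD_zero (c j : Nat) : (List.replicate c (0 : Nat)).getD j 0 = 0 := by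
  induction c generalizing j with
  | zero => simp [List.getD]
  | succ c ih => cases j <;> simp_all [List.replicate, List.getD]

lemma replicate_getD_cell (c j : Nat) :
    (List.replicate c ((0 : Nat), ([] : List (Nat × String)))).getD j (0, []) = (0, []) := by
  induction c generalizing j with
  | zero => simp [List.getD]
  | succ c ih => cases j <;> simp_all [List.replicate, List.getD]

-- A's inner loop computes the LCS recurrence along the row
lemma rowA_spec (eq : Nat → Nat → Bool) (m i : Nat) (prev : List Nat)
    (hprev : ∀ j, j ≤ m → prev.getD j 0 = pvLcs eq i j) :
    ∀ rem j0 k, j0 + rem ≤ m → k < rem →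
      (pvRowA (eq (i + 1)) prev (j0 + 1) (pvLcs eq (i + 1) j0) rem).getD k 0
        = pvLcs eq (i + 1) (j0 + 1 + k) := by
  intro rem
  induction rem with
  | zero => intro j0 k _ hk; omega
  | succ rem ih =>
    intro j0 k hle hk
    have hv : (if eq (i + 1) (j0 + 1) then prev.getD (j0 + 1 - 1) 0 + 1
               else max (prev.getD (j0 + 1) 0) (pvLcs eq (i + 1) j0))
        = pvLcs eq (i + 1) (j0 + 1) := by
      rw [show j0 + 1 - 1 = j0 from rfl, hprev j0 (by omega), hprev (j0 + 1) (by omega)]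
      simp [pvLcs]
    cases k with
    | zero =>
      simp only [pvRowA, List.getD]
      simpa using hv
    | succ k =>
      simp only [pvRowA]
      rw [hv]
      have := ih (j0 + 1) k (by omega) (by omega)
      simpa [List.getD, Nat.add_assoc, Nat.add_comm, Nat.add_left_comm] using this

lemma rowA_rowOK (eq : Nat → Nat → Bool) (m i : Nat) (prev : List Nat)
    (hprev : ∀ j, j ≤ m → prev.getD j 0 = pvLcs eq i j) :
    ∀ j, j ≤ m → (0 :: pvRowA (eq (i + 1)) prev 1 0 m).getD j 0 = pvLcs eq (i + 1) j := by
  intro j hj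
  cases j with
  | zero => simp [List.getD, pvLcs_zero_right]
  | succ j =>
    have := rowA_spec eq m i prev hprev m 0 j (by omega) (by omega)
    rw [pvLcs_zero_right] at this
    simpa [List.getD, Nat.add_comm] using this

-- A's table satisfies the recurrence entrywise
lemma dpA_rows_spec (eq : Nat → Nat → Bool) (m : Nat) :
    ∀ rem i0 prev, (∀ j, j ≤ m → prev.getD j 0 = pvLcs eq i0 j) →
    ∀ k j, k < rem → j ≤ m →
      ((pvRowsA eq m prev (i0 + 1) rem).getD k []).getD j 0 = pvLcs eq (i0 + 1 + k) j := by
  intro rem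
  induction rem with
  | zero => intro _ _ _ _ _ hk _; omega
  | succ rem ih =>
    intro i0 prev hprev k j hk hj
    have hr := rowA_rowOK eq m i0 prev hprev
    cases k with
    | zero => simpa [pvRowsA, List.getD] using hr j hj
    | succ k =>
      simp only [pvRowsA, List.getD_cons_succ]
      have := ih (i0 + 1) _ hr k j (by omega) hj
      simpa [Nat.add_assoc, Nat.add_comm, Nat.add_left_comm] using this

-- A's backtrack writes exactly the path pvPath, head first
lemma backA_path (eq : Nat → Nat → Bool) (words : List String)
    (dpf : Nat → Nat → Nat) (n m : Nat)
    (hdp : ∀ i j, i ≤ n → j ≤ m → dpf i j = pvLcs eq i j) :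
    ∀ N i j a, i + j ≤ N → i ≤ n → j ≤ m →
      pvBackA eq words dpf i j a = pvApply (pvPath eq words i j) a := by
  intro N
  induction N with
  | zero =>
    intro i j a hN _ _
    obtain ⟨rfl, rfl⟩ : i = 0 ∧ j = 0 := by omega
    simp [pvBackA, pvPath, pvApply]
  | succ N ih =>
    intro i j a hN hi hj
    match i, j with
    | 0, j => simp [pvBackA, pvPath, pvApply]
    | i + 1, 0 => simp [pvBackA, pvPath, pvApply]
    | i + 1, j + 1 =>
      simp only [pvBackA, pvPath]
      by_cases h1 : eq (i + 1) (j + 1) = true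
      · rw [if_pos h1, if_pos h1]
        rw [ih i j _ (by omega) (by omega) (by omega)]
        rfl
      · rw [if_neg h1, if_neg h1]
        rw [hdp i (j + 1) (by omega) hj, hdp (i + 1) j (by omega) (by omega)]
        by_cases h2 : pvLcs eq i (j + 1) ≥ pvLcs eq (i + 1) j
        · rw [if_pos h2, if_pos h2]
          exact ih i (j + 1) a (by omega) (by omega) hj
        · rw [if_neg h2, if_neg h2]
          exact ih (i + 1) j a (by omega) hi (by omega)

-- B's inner loop: every cell stores exactly (pvLcs, pvPath)
lemma rowB_spec (eq : Nat → Nat → Bool) (words : List String) (m i : Nat)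
    (prev : List (Nat × List (Nat × String)))
    (hprev : ∀ j, j ≤ m → prev.getD j (0, []) = (pvLcs eq i j, pvPath eq words i j)) :
    ∀ rem j0 k, j0 + rem ≤ m → k < rem →
      (pvRowB (eq (i + 1)) words (i + 1) prev (j0 + 1)
          (pvLcs eq (i + 1) j0, pvPath eq words (i + 1) j0) rem).getD k (0, [])
        = (pvLcs eq (i + 1) (j0 + 1 + k), pvPath eq words (i + 1) (j0 + 1 + k)) := by
  intro rem
  induction rem with
  | zero => intro j0 k _ hk; omega
  | succ rem ih =>
    intro j0 k hle hk
    have hp0 := hprev j0 (by omega)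
    have hp1 := hprev (j0 + 1) (by omega)
    have hc : (if eq (i + 1) (j0 + 1) then
          let p := prev.getD (j0 + 1 - 1) (0, [])
          (p.1 + 1, (i + 1 - 1, words.getD (j0 + 1 - 1) "") :: p.2)
        else if (prev.getD (j0 + 1) (0, [])).1 ≥ (pvLcs eq (i + 1) j0, pvPath eq words (i + 1) j0).1
          then prev.getD (j0 + 1) (0, [])
          else (pvLcs eq (i + 1) j0, pvPath eq words (i + 1) j0))
        = (pvLcs eq (i + 1) (j0 + 1), pvPath eq words (i + 1) (j0 + 1)) := by
      rw [show j0 + 1 - 1 = j0 from rfl, hp0, hp1]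
      by_cases h1 : eq (i + 1) (j0 + 1) = true
      · simp only [if_pos h1]
        have hL : pvLcs eq (i + 1) (j0 + 1) = pvLcs eq i j0 + 1 := by
          simp [pvLcs, h1]
        have hP : pvPath eq words (i + 1) (j0 + 1) = (i, words.getD j0 "") :: pvPath eq words i j0 := by
          simp [pvPath, h1]
        simp [hL, hP]
      · simp only [if_neg h1]
        by_cases h2 : pvLcs eq i (j0 + 1) ≥ pvLcs eq (i + 1) j0
        · simp only [if_pos h2]
          have hL : pvLcs eq (i + 1) (j0 + 1) = pvLcs eq i (j0 + 1) := by
            simp [pvLcs, h1]; omega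
          have hP : pvPath eq words (i + 1) (j0 + 1) = pvPath eq words i (j0 + 1) := by
            simp [pvPath, h1, h2]
          simp [hL, hP]
        · simp only [if_neg h2]
          have hL : pvLcs eq (i + 1) (j0 + 1) = pvLcs eq (i + 1) j0 := by
            simp [pvLcs, h1]; omega
          have hP : pvPath eq words (i + 1) (j0 + 1) = pvPath eq words (i + 1) j0 := by
            simp [pvPath, h1, h2]
          simp [hL, hP]
    cases k with
    | zero =>
      simp only [pvRowB, List.getD_cons_zero]
      exact hc
    | succ k =>
      simp only [pvRowB, List.getD_cons_succ]
      rw [hc]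
      have := ih (j0 + 1) k (by omega) (by omega)
      simpa [Nat.add_assoc, Nat.add_comm, Nat.add_left_comm] using this

lemma rowB_rowOK (eq : Nat → Nat → Bool) (words : List String) (m i : Nat)
    (prev : List (Nat × List (Nat × String)))
    (hprev : ∀ j, j ≤ m → prev.getD j (0, []) = (pvLcs eq i j, pvPath eq words i j)) :
    ∀ j, j ≤ m →
      ((0, []) :: pvRowB (eq (i + 1)) words (i + 1) prev 1 (0, []) m).getD j (0, [])
        = (pvLcs eq (i + 1) j, pvPath eq words (i + 1) j) := by
  intro j hj
  cases j with
  | zero => simp [List.getD, pvLcs_zero_right, pvPath_zero_right]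
  | succ j =>
    have h0 : ((0 : Nat), ([] : List (Nat × String)))
        = (pvLcs eq (i + 1) 0, pvPath eq words (i + 1) 0) := by
      rw [pvLcs_zero_right, pvPath_zero_right]
    have := rowB_spec eq words m i prev hprev m 0 j (by omega) (by omega)
    rw [← h0] at this
    simpa [List.getD, Nat.add_comm] using this

-- B's outer loop: the surviving row is the last one, entrywise (pvLcs, pvPath)
lemma rowsB_spec (eq : Nat → Nat → Bool) (words : List String) (m : Nat) :
    ∀ rem i0 prev, (∀ j, j ≤ m → prev.getD j (0, []) = (pvLcs eq i0 j, pvPath eq words i0 j)) →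
    ∀ j, j ≤ m →
      (pvRowsB eq words m prev (i0 + 1) rem).getD j (0, [])
        = (pvLcs eq (i0 + rem) j, pvPath eq words (i0 + rem) j) := by
  intro rem
  induction rem with
  | zero => intro i0 prev hprev j hj; simpa [pvRowsB] using hprev j hj
  | succ rem ih =>
    intro i0 prev hprev j hj
    simp only [pvRowsB]
    have := ih (i0 + 1) _ (rowB_rowOK eq words m i0 prev hprev) j hj
    simpa [Nat.add_assoc, Nat.add_comm, Nat.add_left_comm] using this

-- B's precomputed lowered lists give the same comparison as A's on-the-fly lowering
lemma lower_empty : PySem.Str.lower "" = "" := by decide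

lemma map_lower_getD (l : List String) (k : Nat) :
    (l.map PySem.Str.lower).getD k "" = PySem.Str.lower (l.getD k "") := by
  induction l generalizing k with
  | nil => cases k <;> simp [List.getD, lower_empty]
  | cons x xs ih =>
    cases k with
    | zero => simp [List.getD]
    | succ k => simpa [List.getD, List.getElem?_map] using ih k

lemma main_eq (backbone words : List String) :
    align_to_backbone_py backbone words = align_to_backbone_py_alt backbone words := by
  simp only [align_to_backbone_py, align_to_backbone_py_alt]
  set n := backbone.length with hn
  set m := words.length with hm
  set eq := pvEq backbone words with heq
  have heqB : (fun i j => (backbone.map PySem.Str.lower).getD (i - 1) ""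
        == (words.map PySem.Str.lower).getD (j - 1) "") = eq := by
    funext i j
    rw [map_lower_getD, map_lower_getD]
    rfl
  rw [heqB]
  have h0 : ∀ j, j ≤ m → (List.replicate (m + 1) (0 : Nat)).getD j 0 = pvLcs eq 0 j := by
    intro j _; rw [replicate_getD_zero]; simp [pvLcs]
  have h0c : ∀ j, j ≤ m →
      (List.replicate (m + 1) ((0 : Nat), ([] : List (Nat × String)))).getD j (0, [])
        = (pvLcs eq 0 j, pvPath eq words 0 j) := by
    intro j _; rw [replicate_getD_cell]; simp [pvLcs, pvPath]
  have hdp : ∀ i j, i ≤ n → j ≤ m →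
      ((((List.replicate (m + 1) 0) :: pvRowsA eq m (List.replicate (m + 1) 0) 1 n).getD i []).getD j 0)
        = pvLcs eq i j := by
    intro i j hi hj
    cases i with
    | zero => simpa [List.getD_cons_zero] using h0 j hj
    | succ i =>
      simp only [List.getD_cons_succ]
      have := dpA_rows_spec eq m n 0 _ h0 i j (by omega) hj
      simpa [Nat.add_comm] using this
  rw [backA_path eq words _ n m hdp (n + m) n m _ le_rfl le_rfl le_rfl]
  have hfin := rowsB_spec eq words m n 0 _ h0c m le_rfl
  simp only [Nat.zero_add] at hfin
  rw [hfin]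

-- ===== VERDICT (by name: the statement is the Claim_ definition above) =====
theorem align_to_backbone_py_spec : Claim_equal_align_to_backbone_py := by
  intro backbone words _
  unfold Spec_align_to_backbone_py
  exact main_eq backbone words
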